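-- pv_equiv track=rewrite | github.com/zmockwebdesign/collatz-v2 | collision_test.py | text_to_number
-- ===== SOURCE A (Python) =====
-- def text_to_number(text, multiplier=100_000_000):
--     result = 0
--     for char in text:
--         result = (result << 7) + (ord(char) & 0x7F)
--     result *= multiplier
--     if not (result & 1):
--         result = (result << 1) | 1
--     return result
-- ===== SOURCE B (Python) =====
-- def text_to_number(text, multiplier=100_000_000):
--     value = 0
--     weight = 1
--     for ch in reversed(text):
--         value += (ord(ch) % 128) * weight
--         weight *= 128
--     value *= multiplier
--     if value % 2 == 0:
--         value = value * 2 + 1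
--     return value
-- ===== Notes on version B (the rewrite author's own statement) =====
-- stated objective: alternative
-- what changed: Replaces Horner's left-to-right shift-accumulate with a right-to-left pass that maintains an explicit place-value weight (value += (ord(ch)%128)*weight; weight *= 128), and states the odd-forcing tail arithmetically (value%2, value*2+1) instead of bitwise.
import Mathlib
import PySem

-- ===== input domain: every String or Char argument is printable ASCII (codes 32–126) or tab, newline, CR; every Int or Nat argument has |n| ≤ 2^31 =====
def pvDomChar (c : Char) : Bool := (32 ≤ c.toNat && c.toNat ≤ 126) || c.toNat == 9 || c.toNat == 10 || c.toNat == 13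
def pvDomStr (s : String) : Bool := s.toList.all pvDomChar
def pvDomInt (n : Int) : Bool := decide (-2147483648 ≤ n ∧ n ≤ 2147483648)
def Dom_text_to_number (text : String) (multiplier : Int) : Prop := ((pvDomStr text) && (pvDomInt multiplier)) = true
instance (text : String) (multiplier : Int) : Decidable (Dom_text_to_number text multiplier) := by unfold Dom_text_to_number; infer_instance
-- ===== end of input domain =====

-- B replaces A's left-to-right Horner shift-accumulate with a right-to-left pass that
-- maintains an explicit place-value weight, and states the odd-forcing tail arithmetically.


-- ===== PORT A =====
-- Horner loop: result = (result << 7) + (ord(char) & 0x7F), then *= multiplier, force odd.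
-- Python's & / << / | on ints are ported with Int.land / <<< (Int) / Int.lor (exact here:
-- the shift amounts are the nonnegative literals 7 and 1).
def text_to_number (text : String) (multiplier : Int) : Int :=
  let result : Int := text.toList.foldl
    (fun result char => (result <<< (7 : Int)) + Int.land (Int.ofNat char.toNat) 127) 0
  let result := result * multiplier
  if Int.land result 1 == 0 then Int.lor (result <<< (1 : Int)) 1 else result

-- ===== PORT B =====
-- right-to-left pass over reversed(text) carrying (value, weight):
-- value += (ord(ch) % 128) * weight; weight *= 128; then the arithmetic odd-forcing tail.
-- '%' here is Python's % with the positive divisor 128 resp. 2, which coincides with Int.emod.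
def text_to_number_alt (text : String) (multiplier : Int) : Int :=
  let p : Int × Int := text.toList.reverse.foldl
    (fun (s : Int × Int) ch => (s.1 + (Int.ofNat ch.toNat) % 128 * s.2, s.2 * 128))
    (0, 1)
  let value := p.1 * multiplier
  if value % 2 == 0 then value * 2 + 1 else value

-- ===== PRECONDITION & SPEC =====
def Spec_text_to_number (text : String) (multiplier : Int) (out : Int) : Prop := out = text_to_number_alt text multiplier
instance (text : String) (multiplier : Int) (out : Int) : Decidable (Spec_text_to_number text multiplier out) := by unfold Spec_text_to_number; infer_instance

-- ===== CLAIM (what is proved, stated in full; the proofs are below) =====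
def Claim_equal_text_to_number : Prop := ∀ (text : String) (multiplier : Int), Dom_text_to_number text multiplier → Spec_text_to_number text multiplier (text_to_number text multiplier)

-- ===== LEMMAS AND PROOFS =====

-- the per-character digit, in B's form
def pvV (c : Char) : Int := Int.ofNat c.toNat % 128

-- A's digit (land with 127) equals B's (% 128)
theorem pv_land127 (n : Nat) : Int.land (Int.ofNat n) 127 = Int.ofNat n % 128 := by
  simp [Int.land, Nat.and_two_pow_sub_one_eq_mod n 7]

-- Horner characterisation: S l = Σ v(l_i) * 128^(n-1-i)
def pvS : List Char → Int
  | [] => 0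
  | c :: t => pvV c * 128 ^ t.length + pvS t

-- back-to-front characterisation: T l = v(l_0) + 128 * T (tail)
def pvT : List Char → Int
  | [] => 0
  | c :: t => pvV c + 128 * pvT t

theorem pv_shl7 (r : Int) : r <<< (7 : Int) = r * 128 := by
  rw [show ((7 : Int)) = ((7 : Nat) : Int) by norm_num, Int.shiftLeft_natCast_right,
    Int.shiftLeft_eq]
  norm_num

theorem pv_shl1 (r : Int) : r <<< (1 : Int) = r * 2 := by
  rw [show ((1 : Int)) = ((1 : Nat) : Int) by norm_num, Int.shiftLeft_natCast_right,
    Int.shiftLeft_eq]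
  norm_num

theorem pv_ldiff_one (m : Nat) : Nat.ldiff 1 m = 1 - m % 2 := by
  apply Nat.eq_of_testBit_eq
  intro k
  rw [Nat.testBit_ldiff]
  cases k with
  | zero => rcases Nat.mod_two_eq_zero_or_one m with h|h <;> simp [Nat.testBit_zero, h]
  | succ k =>
      have h2 : (1 - m % 2) / 2 = 0 := by omega
      simp only [Nat.testBit_succ]
      norm_num [h2, Nat.zero_testBit]

theorem pv_ldiff_odd (m : Nat) : Nat.ldiff (2 * m + 1) 1 = 2 * m := by
  apply Nat.eq_of_testBit_eq
  intro k
  rw [Nat.testBit_ldiff]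
  cases k with
  | zero => simp [Nat.testBit_zero, Nat.mul_mod_right]
  | succ k =>
      have h1 : (2 * m + 1) / 2 = m := by omega
      have h2 : 2 * m / 2 = m := by omega
      simp only [Nat.testBit_succ]
      norm_num [h1, h2]

-- r & 1 = r % 2 on all of Int
theorem pv_land1 (r : Int) : Int.land r 1 = r % 2 := by
  cases r with
  | ofNat n =>
      simp [Int.land, Nat.and_one_is_mod]
  | negSucc m =>
      simp [Int.land, pv_ldiff_one]
      omega

-- (2r) | 1 = 2r + 1 on all of Int
theorem pv_lor1 (r : Int) : Int.lor (2 * r) 1 = 2 * r + 1 := by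
  cases r with
  | ofNat n =>
      rw [show (2 * Int.ofNat n) = Int.ofNat (2 * n) by simp]
      simp only [Int.lor]
      have : 2 * n ||| 1 = 2 * n + 1 := by
        simpa [Nat.bit, Nat.mul_comm] using Nat.lor_bit false n true 0
      simp [this]
  | negSucc m =>
      rw [show (2 * Int.negSucc m) = Int.negSucc (2 * m + 1) by rfl]
      simp only [Int.lor, pv_ldiff_odd]
      simp [Int.negSucc_eq]

-- A's loop computes the positional sum pvS
theorem pv_horner (l : List Char) (a : Int) :
    l.foldl (fun r c => (r <<< (7 : Int)) + Int.land (Int.ofNat c.toNat) 127) a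
      = a * 128 ^ l.length + pvS l := by
  induction l generalizing a with
  | nil => simp [pvS]
  | cons c t ih =>
    rw [List.foldl_cons, ih]
    simp only [pvS, List.length_cons, pv_shl7, pv_land127, pvV, pow_succ]
    ring

-- B's pair loop computes pvT together with the running weight
theorem pv_pair (l : List Char) (a w : Int) :
    l.foldl (fun (s : Int × Int) c => (s.1 + (Int.ofNat c.toNat) % 128 * s.2, s.2 * 128)) (a, w)
      = (a + w * pvT l, w * 128 ^ l.length) := by
  induction l generalizing a w with
  | nil => simp [pvT]
  | cons c t ih =>
    rw [List.foldl_cons, ih]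
    simp only [pvT, List.length_cons, pvV, pow_succ]
    rw [Prod.mk.injEq]
    constructor <;> ring

theorem pv_T_append (xs : List Char) (c : Char) :
    pvT (xs ++ [c]) = pvT xs + pvV c * 128 ^ xs.length := by
  induction xs with
  | nil => simp [pvT]
  | cons x t ih =>
    simp only [List.cons_append, pvT, ih, List.length_cons, pow_succ]
    ring

theorem pv_S_eq_T_reverse (l : List Char) : pvS l = pvT l.reverse := by
  induction l with
  | nil => rfl
  | cons c t ih =>
    simp only [pvS, List.reverse_cons, pv_T_append, ih, List.length_reverse]
    ring

-- the two odd-forcing tails agree on every Int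
theorem pv_tail (v : Int) :
    (if (Int.land v 1 == 0) = true then Int.lor (v <<< (1 : Int)) 1 else v)
      = (if (v % 2 == 0) = true then v * 2 + 1 else v) := by
  rw [pv_land1, pv_shl1]
  by_cases h : v % 2 = 0 <;> simp [h, mul_comm v 2, pv_lor1]

-- ===== VERDICT (by name: the statement is the Claim_ definition above) =====
theorem text_to_number_spec : Claim_equal_text_to_number := by
  intro text multiplier _
  unfold Spec_text_to_number text_to_number text_to_number_alt
  have hloop : text.toList.foldl
      (fun result char => (result <<< (7 : Int)) + Int.land (Int.ofNat char.toNat) 127) 0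
      = (text.toList.reverse.foldl
          (fun (s : Int × Int) ch => (s.1 + (Int.ofNat ch.toNat) % 128 * s.2, s.2 * 128))
          (0, 1)).1 := by
    rw [pv_horner, pv_pair, pv_S_eq_T_reverse]
    simp
  rw [hloop]
  exact pv_tail _
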